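-- pv_equiv track=rewrite | github.com/Romain-Gerard/algo | packcombi.py | convert_part_A_to_B
-- ===== SOURCE A (Python) =====
-- def convert_part_A_to_B(part_A, permu_signed_inds):
--     """
--     Convertit une partition de type A en une partition de type B en inversant le signe
--     aux indices spécifiés par permu_signed_inds.
--     """
--     ind = 0
--     part_B = []
--     for i in range(len(part_A)):
--         bloc = []
--         for j in range(0, len(part_A[i])):
--             if ind in permu_signed_inds:
--                 bloc.append(-part_A[i][j])
--             else:
--                 bloc.append(part_A[i][j])
--             ind += 1
--         part_B.append(bloc)
--     return part_B
-- ===== SOURCE B (Python) =====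
-- def convert_part_A_to_B(part_A, permu_signed_inds):
--     flat = []
--     sizes = []
--     for bloc in part_A:
--         sizes.append(len(bloc))
--         flat.extend(bloc)
--     neg = [-v if i in permu_signed_inds else v for i, v in enumerate(flat)]
--     part_B = []
--     pos = 0
--     for n in sizes:
--         part_B.append(neg[pos:pos + n])
--         pos += n
--     return part_B
-- ===== Notes on version B (the rewrite author's own statement) =====
-- stated objective: alternative
-- what changed: Replaced the per-block nested index loop with a running counter by a flatten / enumerate-negate / re-chunk-by-sizes three-pass pipeline.
import Mathlib
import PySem

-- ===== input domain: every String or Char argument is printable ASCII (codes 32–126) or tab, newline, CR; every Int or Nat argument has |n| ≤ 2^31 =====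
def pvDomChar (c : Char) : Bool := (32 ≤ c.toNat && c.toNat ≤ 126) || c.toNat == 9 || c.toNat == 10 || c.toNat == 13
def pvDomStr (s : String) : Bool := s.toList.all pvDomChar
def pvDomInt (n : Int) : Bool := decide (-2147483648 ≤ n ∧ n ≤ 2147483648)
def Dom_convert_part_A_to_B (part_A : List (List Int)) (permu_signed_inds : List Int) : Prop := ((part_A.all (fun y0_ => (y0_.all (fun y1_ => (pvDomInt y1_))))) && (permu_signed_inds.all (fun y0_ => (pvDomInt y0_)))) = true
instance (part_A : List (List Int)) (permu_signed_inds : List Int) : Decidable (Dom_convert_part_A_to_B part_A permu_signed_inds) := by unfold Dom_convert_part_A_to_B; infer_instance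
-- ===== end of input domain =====

-- B replaces A's nested loops with a flatten / enumerate-negate / re-chunk-by-sizes pipeline (alternative decomposition, same cost).

-- ===== PORT A =====
-- literal port of A: outer loop over blocks, inner loop with a running flat counter `ind`
def convert_part_A_to_B (part_A : List (List Int)) (permu_signed_inds : List Int) : List (List Int) :=
  let st := part_A.foldl (fun (s : Int × List (List Int)) blocA =>
    let inner := blocA.foldl (fun (t : Int × List Int) x =>
      (t.1 + 1, t.2 ++ [if t.1 ∈ permu_signed_inds then -x else x])) (s.1, [])
    (inner.1, s.2 ++ [inner.2])) (0, [])
  st.2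

-- ===== PORT B =====
-- literal port of Source B: pass 1 collects sizes and the flattened values; pass 2 negates by
-- enumerated flat index; pass 3 slices consecutive chunks back off by the recorded sizes
def convert_part_A_to_B_alt (part_A : List (List Int)) (permu_signed_inds : List Int) : List (List Int) :=
  let sf := part_A.foldl (fun (p : List Int × List Int) bloc =>
    (p.1 ++ [(bloc.length : Int)], p.2 ++ bloc)) ([], [])
  let neg := (PySem.List.enumerate sf.2 0).map (fun q => if q.1 ∈ permu_signed_inds then -q.2 else q.2)
  let fin := sf.1.foldl (fun (q : Int × List (List Int)) n =>
    (q.1 + n, q.2 ++ [PySem.List.slice neg (some q.1) (some (q.1 + n))])) (0, [])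
  fin.2

-- ===== PRECONDITION & SPEC =====
def Spec_convert_part_A_to_B (part_A : List (List Int)) (permu_signed_inds : List Int) (out : List (List Int)) : Prop := out = convert_part_A_to_B_alt part_A permu_signed_inds
instance (part_A : List (List Int)) (permu_signed_inds : List Int) (out : List (List Int)) : Decidable (Spec_convert_part_A_to_B part_A permu_signed_inds out) := by unfold Spec_convert_part_A_to_B; infer_instance

-- ===== CLAIM (what is proved, stated in full; the proofs are below) =====
def Claim_equal_convert_part_A_to_B : Prop := ∀ (part_A : List (List Int)) (permu_signed_inds : List Int), Dom_convert_part_A_to_B part_A permu_signed_inds → Spec_convert_part_A_to_B part_A permu_signed_inds (convert_part_A_to_B part_A permu_signed_inds)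

-- ===== LEMMAS AND PROOFS =====

-- reference: negate with a running flat counter
def mapNeg (inds : List Int) : List Int → Int → List Int
  | [], _ => []
  | x :: xs, k => (if k ∈ inds then -x else x) :: mapNeg inds xs (k + 1)

def refConv (inds : List Int) : List (List Int) → Int → List (List Int)
  | [], _ => []
  | b :: bs, k => mapNeg inds b k :: refConv inds bs (k + b.length)

theorem mapNeg_length (inds : List Int) (xs : List Int) (k : Int) :
    (mapNeg inds xs k).length = xs.length := by
  induction xs generalizing k with
  | nil => rfl
  | cons x xs ih => simp [mapNeg, ih]

theorem mapNeg_append (inds : List Int) (xs ys : List Int) (k : Int) :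
    mapNeg inds (xs ++ ys) k = mapNeg inds xs k ++ mapNeg inds ys (k + xs.length) := by
  induction xs generalizing k with
  | nil => simp [mapNeg]
  | cons x xs ih =>
    simp [mapNeg, ih]
    ring_nf

theorem innerA (inds : List Int) (bloc : List Int) :
    ∀ (k : Int) (acc : List Int),
      bloc.foldl (fun (t : Int × List Int) x =>
        (t.1 + 1, t.2 ++ [if t.1 ∈ inds then -x else x])) (k, acc)
      = (k + bloc.length, acc ++ mapNeg inds bloc k) := by
  induction bloc with
  | nil => intro k acc; simp [mapNeg]
  | cons x xs ih =>
    intro k acc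
    simp only [List.foldl_cons, ih, mapNeg]
    simp only [Prod.mk.injEq, List.length_cons]
    refine ⟨by push_cast; ring, by simp⟩

theorem outerA (inds : List Int) (bs : List (List Int)) :
    ∀ (k : Int) (acc : List (List Int)),
      bs.foldl (fun (s : Int × List (List Int)) blocA =>
        let inner := blocA.foldl (fun (t : Int × List Int) x =>
          (t.1 + 1, t.2 ++ [if t.1 ∈ inds then -x else x])) (s.1, [])
        (inner.1, s.2 ++ [inner.2])) (k, acc)
      = (k + bs.flatten.length, acc ++ refConv inds bs k) := by
  induction bs with
  | nil => intro k acc; simp [refConv]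
  | cons b bs ih =>
    intro k acc
    set f : Int × List (List Int) → List Int → Int × List (List Int) :=
      (fun (s : Int × List (List Int)) blocA =>
        let inner := blocA.foldl (fun (t : Int × List Int) x =>
          (t.1 + 1, t.2 ++ [if t.1 ∈ inds then -x else x])) (s.1, [])
        (inner.1, s.2 ++ [inner.2])) with hf
    have h1 : f (k, acc) b = ((k + b.length : Int), acc ++ [mapNeg inds b k]) := by
      rw [hf]; simp [innerA]
    rw [List.foldl_cons, h1, hf, ih]
    simp only [Prod.mk.injEq, refConv, List.flatten_cons, List.length_append]
    refine ⟨by push_cast; ring, by simp⟩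

theorem sizesFlat (bs : List (List Int)) :
    ∀ (s f : List Int),
      bs.foldl (fun (p : List Int × List Int) bloc =>
        (p.1 ++ [(bloc.length : Int)], p.2 ++ bloc)) (s, f)
      = (s ++ bs.map (fun b => (b.length : Int)), f ++ bs.flatten) := by
  induction bs with
  | nil => intro s f; simp
  | cons b bs ih => intro s f; simp [ih]

theorem negEnum (inds : List Int) (xs : List Int) :
    ∀ (k : Int),
      (PySem.List.enumerate xs k).map (fun q => if q.1 ∈ inds then -q.2 else q.2)
      = mapNeg inds xs k := by
  induction xs with
  | nil => intro k; simp [PySem.List.enumerate_nil, mapNeg]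
  | cons x xs ih => intro k; simp [PySem.List.enumerate_cons, mapNeg, ih]

theorem chunkB (inds : List Int) (bs : List (List Int)) :
    ∀ (pre : List Int) (acc : List (List Int)) (k : Int) (neg : List Int),
      neg = pre ++ mapNeg inds bs.flatten k →
      (bs.map (fun b => (b.length : Int))).foldl (fun (q : Int × List (List Int)) n =>
        (q.1 + n, q.2 ++ [PySem.List.slice neg (some q.1) (some (q.1 + n))]))
        ((pre.length : Int), acc)
      = ((pre.length : Int) + bs.flatten.length, acc ++ refConv inds bs k) := by
  induction bs with
  | nil => intro pre acc k neg _; simp [refConv]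
  | cons b bs ih =>
    intro pre acc k neg hneg
    have hflat : (b :: bs).flatten = b ++ bs.flatten := by simp
    rw [hflat] at hneg
    rw [mapNeg_append] at hneg
    have hslice : PySem.List.slice neg (some (pre.length : Int))
        (some ((pre.length : Int) + (b.length : Int))) = mapNeg inds b k := by
      rw [PySem.List.slice_natCast_add, hneg]
      rw [List.drop_append_of_le_length (by omega), List.drop_length, List.nil_append]
      rw [List.take_append_of_le_length (by rw [mapNeg_length])]
      rw [List.take_of_length_le (by rw [mapNeg_length])]
    have hpre : ((pre ++ mapNeg inds b k).length : Int) = (pre.length : Int) + (b.length : Int) := by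
      simp [mapNeg_length]
    have := ih (pre ++ mapNeg inds b k) (acc ++ [mapNeg inds b k]) (k + b.length) neg
      (by rw [hneg, List.append_assoc])
    rw [hpre] at this
    simp only [List.map_cons, List.foldl_cons, hslice, this, refConv]
    simp only [Prod.mk.injEq, List.flatten_cons, List.length_append]
    refine ⟨by push_cast; ring, by simp⟩

-- ===== VERDICT (by name: the statement is the Claim_ definition above) =====
theorem convert_part_A_to_B_spec : Claim_equal_convert_part_A_to_B := by
  intro part_A inds _
  show _ = _
  unfold convert_part_A_to_B convert_part_A_to_B_alt
  simp only [outerA, sizesFlat, List.nil_append, negEnum]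
  have := chunkB inds part_A [] [] 0 (mapNeg inds part_A.flatten 0) (by simp)
  simp only [List.length_nil, Int.natCast_zero] at this
  rw [this]
  simp
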